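-- pv_equiv track=rewrite | github.com/MattesR/infinigram_explorer | tightest_queries.py | cnf_match_positions
-- ===== SOURCE A (Python) =====
-- def _find_subsequence(tokens, pattern):
--     """Find all start positions where pattern (list of ints) appears in tokens."""
--     positions = []
--     plen = len(pattern)
--     if plen == 0:
--         return positions
--     for i in range(len(tokens) - plen + 1):
--         if tokens[i:i + plen] == pattern:
--             positions.append(i)
--     return positions
--
-- def cnf_match_positions(cnf, tokens):
--     """
--     For each clause in cnf, find all token positions where any alternative matches.
--     Returns list of position lists (one per clause), or None if any clause has no match.
--
--     Each clause is a list of alternatives (each alternative is a list of token IDs).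
--     """
--     clause_positions = []
--     for clause in cnf:
--         positions = []
--         for alternative in clause:
--             for pos in _find_subsequence(tokens, list(alternative)):
--                 if pos not in positions:
--                     positions.append(pos)
--         if not positions:
--             return None  # clause failed
--         clause_positions.append(sorted(positions))
--     return clause_positions
-- ===== SOURCE B (Python) =====
-- def cnf_match_positions(cnf, tokens):
--     """
--     For each clause in cnf, find all token positions where any alternative matches.
--     Returns list of position lists (one per clause), or None if any clause has no match.
--
--     Faster strategy: index token positions by token value once, then for each
--     alternative only test the candidate positions where its first token occurs.
--     """
--     index = {}
--     for i, t in enumerate(tokens):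
--         index.setdefault(t, []).append(i)
--     result = []
--     for clause in cnf:
--         matches = set()
--         for alt in clause:
--             if alt:
--                 m = len(alt)
--                 for i in index.get(alt[0], []):
--                     if tokens[i:i + m] == alt:
--                         matches.add(i)
--         if not matches:
--             return None
--         result.append(sorted(matches))
--     return result
-- ===== Notes on version B (the rewrite author's own statement) =====
-- stated objective: faster
-- what changed: B builds a hash index from token value to its positions in one pass, then tests each alternative only at the candidate positions where its first token occurs (collecting matches in a set), instead of A's scan of every start position for every alternative with a linear 'pos not in positions' dedup.
import Mathlib
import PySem

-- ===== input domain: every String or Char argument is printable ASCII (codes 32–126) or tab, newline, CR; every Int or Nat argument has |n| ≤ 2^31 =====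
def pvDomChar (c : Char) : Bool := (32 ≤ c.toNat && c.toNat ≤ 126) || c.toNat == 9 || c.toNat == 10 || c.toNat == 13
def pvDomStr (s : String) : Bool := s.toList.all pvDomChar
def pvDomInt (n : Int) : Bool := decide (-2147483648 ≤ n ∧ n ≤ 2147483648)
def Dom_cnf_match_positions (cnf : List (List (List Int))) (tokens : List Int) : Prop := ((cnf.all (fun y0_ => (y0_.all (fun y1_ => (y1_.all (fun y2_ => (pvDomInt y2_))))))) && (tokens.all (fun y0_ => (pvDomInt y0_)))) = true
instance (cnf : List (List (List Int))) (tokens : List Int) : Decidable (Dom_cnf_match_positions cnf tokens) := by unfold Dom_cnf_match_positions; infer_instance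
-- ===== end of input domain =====

-- B replaces A's per-alternative scan of every start position by a one-pass value→positions
-- index: each alternative is tested only at the positions where its first token occurs.

-- ===== PORT A =====
def findSubsequence (tokens pattern : List Int) : List Int :=
  if (pattern.length : Int) = 0 then []
  else
    (PySem.List.pyRange 0 ((tokens.length : Int) - (pattern.length : Int) + 1) 1).foldl
      (fun positions i =>
        if PySem.List.slice tokens (some i) (some (i + (pattern.length : Int))) = pattern then
          positions ++ [i]
        else positions) []

def cnfAGo (tokens : List Int) (acc : List (List Int)) : List (List (List Int)) → Option (List (List Int))
  | [] => some acc
  | clause :: rest =>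
    let positions := clause.foldl (fun positions alternative =>
      (findSubsequence tokens alternative).foldl
        (fun positions pos => if pos ∈ positions then positions else positions ++ [pos])
        positions) ([] : List Int)
    if positions = [] then none
    else cnfAGo tokens (acc ++ [PySem.List.sorted positions (fun x => x) false]) rest

def cnf_match_positions (cnf : List (List (List Int))) (tokens : List Int) : Option (List (List Int)) :=
  cnfAGo tokens [] cnf

-- ===== PORT B =====
-- index = {}; for i, t in enumerate(tokens): index.setdefault(t, []).append(i)
def buildIndex (tokens : List Int) : PySem.Dict Int (List Int) :=
  (PySem.List.enumerate tokens).foldl (fun d p => d.modify p.2 [] (· ++ [p.1])) PySem.Dict.empty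

def clauseMatches (index : PySem.Dict Int (List Int)) (tokens : List Int) (clause : List (List Int)) : PySem.Set Int :=
  clause.foldl (fun ms alt =>
    match alt with
    | [] => ms
    | a0 :: _ =>
      (index.getD a0 []).foldl (fun ms i =>
        if PySem.List.slice tokens (some i) (some (i + (alt.length : Int))) = alt then
          PySem.Set.add ms i
        else ms) ms) PySem.Set.empty

def cnfBGo (index : PySem.Dict Int (List Int)) (tokens : List Int) (acc : List (List Int)) :
    List (List (List Int)) → Option (List (List Int))
  | [] => some acc
  | clause :: rest =>
    let ms := clauseMatches index tokens clause
    if ms = [] then none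
    else cnfBGo index tokens (acc ++ [PySem.List.sorted ms (fun x => x) false]) rest

def cnf_match_positions_alt (cnf : List (List (List Int))) (tokens : List Int) : Option (List (List Int)) :=
  cnfBGo (buildIndex tokens) tokens [] cnf

-- ===== PRECONDITION & SPEC =====
def Spec_cnf_match_positions (cnf : List (List (List Int))) (tokens : List Int) (out : Option (List (List Int))) : Prop := out = cnf_match_positions_alt cnf tokens
instance (cnf : List (List (List Int))) (tokens : List Int) (out : Option (List (List Int))) : Decidable (Spec_cnf_match_positions cnf tokens out) := by unfold Spec_cnf_match_positions; infer_instance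

-- ===== CLAIM (what is proved, stated in full; the proofs are below) =====
def Claim_equal_cnf_match_positions : Prop := ∀ (cnf : List (List (List Int))) (tokens : List Int), Dom_cnf_match_positions cnf tokens → Spec_cnf_match_positions cnf tokens (cnf_match_positions cnf tokens)

-- ===== LEMMAS AND PROOFS =====

-- the index maps a token value to the positions (in ascending order) where it occurs
theorem getD_buildIndex (tokens : List Int) (t : Int) :
    (buildIndex tokens).getD t [] =
      ((PySem.List.enumerate tokens).filter (fun p => p.2 == t)).map (·.1) := by
  unfold buildIndex
  have h := List.foldl_map (f := fun p : Int × Int => (p.2, p.1))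
    (g := fun (d : PySem.Dict Int (List Int)) (q : Int × Int) => d.modify q.1 [] (· ++ [q.2]))
    (l := PySem.List.enumerate tokens) (init := PySem.Dict.empty)
  simp only at h
  rw [← h, PySem.Dict.getD_foldl_modify_append]
  simp [List.filter_map, Function.comp_def]

-- a successful slice comparison pins down the first token and the in-bounds fact
theorem slice_facts (tokens : List Int) (x : Int) (a0 : Int) (rest : List Int) (hx : 0 ≤ x)
    (h : PySem.List.slice tokens (some x) (some (x + ((a0 :: rest).length : Int))) = a0 :: rest) :
    x.toNat + rest.length + 1 ≤ tokens.length ∧ tokens[x.toNat]? = some a0 := by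
  have hb : (0:Int) ≤ x + ((a0 :: rest).length : Int) := by positivity
  rw [PySem.List.slice_toNat tokens hx hb] at h
  have htn : (x + ((a0 :: rest).length : Int)).toNat - x.toNat = rest.length + 1 := by
    simp only [List.length_cons] at *
    omega
  rw [htn] at h
  have hlen := congrArg List.length h
  simp [Nat.min_def] at hlen
  constructor
  · omega
  · have hne : tokens.drop x.toNat ≠ [] := by
      intro hnil
      rw [hnil] at h
      simp at h
    rw [← List.head?_drop]
    cases hd : tokens.drop x.toNat with
    | nil => exact absurd hd hne
    | cons b l' =>
      rw [hd] at h
      simp [List.take_succ_cons] at h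
      simp [h.1]

-- A's scan over all start positions equals B's candidate filter
theorem findSubsequence_eq_filter (tokens : List Int) (a0 : Int) (rest : List Int) :
    findSubsequence tokens (a0 :: rest) =
      ((buildIndex tokens).getD a0 []).filter
        (fun i => decide (PySem.List.slice tokens (some i) (some (i + ((a0 :: rest).length : Int))) = a0 :: rest)) := by
  unfold findSubsequence
  rw [getD_buildIndex]
  rw [if_neg (by simp only [List.length_cons]; push_cast; omega)]
  rw [PySem.List.foldl_append_ite_eq_filter]
  simp only [List.nil_append]
  set cond := fun i => decide (PySem.List.slice tokens (some i) (some (i + ((a0 :: rest).length : Int))) = a0 :: rest) with hcond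
  have memcond : ∀ x, cond x = true ↔ PySem.List.slice tokens (some x) (some (x + ((a0 :: rest).length : Int))) = a0 :: rest := by
    intro x; simp [hcond]
  have p1 : ((PySem.List.pyRange 0 ((tokens.length : Int) - ((a0 :: rest).length : Int) + 1) 1).filter cond).Pairwise (· < ·) :=
    List.Pairwise.sublist List.filter_sublist (PySem.List.pairwise_lt_pyRange_one _ _)
  have p2 : ((((PySem.List.enumerate tokens).filter (fun p => p.2 == a0)).map (·.1)).filter cond).Pairwise (· < ·) := by
    apply List.Pairwise.sublist List.filter_sublist
    rw [List.pairwise_map]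
    exact List.Pairwise.sublist List.filter_sublist (PySem.List.pairwise_lt_enumerate tokens 0)
  have hmem : ∀ x, x ∈ (PySem.List.pyRange 0 ((tokens.length : Int) - ((a0 :: rest).length : Int) + 1) 1).filter cond ↔
      x ∈ (((PySem.List.enumerate tokens).filter (fun p => p.2 == a0)).map (·.1)).filter cond := by
    intro x
    simp only [List.mem_filter, PySem.List.mem_pyRange_one, List.mem_map, List.mem_filter,
      PySem.List.mem_enumerate_iff]
    constructor
    · rintro ⟨⟨hx0, _⟩, hc⟩
      have hf := slice_facts tokens x a0 rest hx0 ((memcond x).mp hc)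
      refine ⟨⟨(x, a0), ⟨⟨x.toNat, by omega, ?_⟩, by simp⟩, rfl⟩, hc⟩
      have : tokens[x.toNat] = a0 := by
        have := hf.2
        rwa [List.getElem?_eq_getElem (by omega), Option.some_inj] at this
      simp [this]
      omega
    · rintro ⟨⟨p, ⟨⟨k, hk, rfl⟩, hpa⟩, hpx⟩, hc⟩
      simp only [beq_iff_eq] at hpa
      have hx0 : 0 ≤ x := by rw [← hpx]; positivity
      have hf := slice_facts tokens x a0 rest hx0 ((memcond x).mp hc)
      have hxk : x = (k:Int) := by simpa using hpx.symm
      refine ⟨⟨hx0, by simp only [List.length_cons] at *; push_cast; omega⟩, hc⟩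
  have hperm := (List.perm_ext_iff_of_nodup (p1.imp ne_of_lt) (p2.imp ne_of_lt)).mpr hmem
  exact hperm.eq_of_pairwise (fun a b _ _ hab hba => absurd hab (lt_asymm hba)) p1 p2

-- A's linear 'pos not in positions' dedup append IS set insertion
theorem dedup_append_eq_add (pos : List Int) (p : Int) :
    (if p ∈ pos then pos else pos ++ [p]) = PySem.Set.add pos p := by
  simp [PySem.Set.add, PySem.Set.contains]

-- per clause: A's accumulation equals B's set accumulation
theorem clause_eq (tokens : List Int) (clause : List (List Int)) :
    clause.foldl (fun positions alternative =>
      (findSubsequence tokens alternative).foldl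
        (fun positions pos => if pos ∈ positions then positions else positions ++ [pos])
        positions) ([] : List Int) = clauseMatches (buildIndex tokens) tokens clause := by
  unfold clauseMatches
  apply PySem.List.foldl_congr_mem
  intro s alt _
  cases alt with
  | nil => simp [findSubsequence]
  | cons a0 rest =>
    rw [findSubsequence_eq_filter]
    simp only [dedup_append_eq_add]
    rw [PySem.List.foldl_ite_eq_foldl_filter]

theorem go_eq (tokens : List Int) (cnf : List (List (List Int))) (acc : List (List Int)) :
    cnfAGo tokens acc cnf = cnfBGo (buildIndex tokens) tokens acc cnf := by
  induction cnf generalizing acc with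
  | nil => rfl
  | cons clause rest ih =>
    simp only [cnfAGo, cnfBGo, clause_eq]
    split_ifs with h
    · rfl
    · exact ih _

-- ===== VERDICT (by name: the statement is the Claim_ definition above) =====
theorem cnf_match_positions_spec : Claim_equal_cnf_match_positions := by
  intro cnf tokens _
  show cnf_match_positions cnf tokens = cnf_match_positions_alt cnf tokens
  exact go_eq tokens cnf []
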